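-- pv_equiv track=rewrite | github.com/dev-saifar/servicepulse | app/modules/settings.py | _unc_share_root
-- ===== SOURCE A (Python) =====
-- def _is_unc(path: str) -> bool:
--     return path.startswith('\\\\') or path.startswith('//')
--
-- def _unc_share_root(path: str) -> str:
--     if not _is_unc(path):
--         return ''
--     p = path.replace('/', '\\')
--     parts = [x for x in p.split('\\') if x]
--     if len(parts) >= 2:
--         return f"\\\\{parts[0]}\\{parts[1]}"
--     return ''
-- ===== SOURCE B (Python) =====
-- def _scan(s):
--     # cursor parser: consume leading separators, then one component;
--     # return (component, remainder after the component)
--     k = 0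
--     while k < len(s) and s[k] in '\\/':
--         k += 1
--     m = k
--     while m < len(s) and s[m] not in '\\/':
--         m += 1
--     return s[k:m], s[m:]
--
-- def _unc_share_root(path: str) -> str:
--     # recursive-descent cursor parse: no full split, stops after two components
--     if path[:2] not in ('\\\\', '//'):
--         return ''
--     first, rest = _scan(path)
--     second, _ = _scan(rest)
--     if second:
--         return '\\\\' + first + '\\' + second
--     return ''
-- ===== Notes on version B (the rewrite author's own statement) =====
-- stated objective: alternative
-- what changed: Replaces the normalize/split-all/filter/index pipeline with a recursive-descent cursor parser that consumes leading separators and exactly the first two components, never splitting the rest of the string.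
import Mathlib
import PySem

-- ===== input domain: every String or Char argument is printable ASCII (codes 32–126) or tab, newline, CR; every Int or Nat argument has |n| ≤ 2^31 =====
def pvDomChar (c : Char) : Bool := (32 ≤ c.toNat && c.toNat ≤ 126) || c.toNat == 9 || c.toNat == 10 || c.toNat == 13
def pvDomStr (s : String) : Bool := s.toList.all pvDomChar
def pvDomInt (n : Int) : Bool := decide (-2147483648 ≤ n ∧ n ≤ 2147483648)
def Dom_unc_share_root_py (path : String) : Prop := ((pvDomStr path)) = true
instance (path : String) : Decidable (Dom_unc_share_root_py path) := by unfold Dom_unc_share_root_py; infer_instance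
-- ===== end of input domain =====

-- B replaces A's replace/split-all/filter/index pipeline with a cursor parser that consumes
-- only the first two separator-delimited components (alternative decomposition, same cost).

-- ===== PORT A =====
-- _is_unc(path)
def aIsUnc (path : String) : Bool :=
  PySem.Str.startswith path "\\\\" || PySem.Str.startswith path "//"

def unc_share_root_py (path : String) : String :=
  if !(aIsUnc path) then "" else
    let p := PySem.Chars.replace path.toList ['/'] ['\\']          -- path.replace('/', '\\')
    let parts := (PySem.Chars.splitOn p ['\\']).filter (fun x => !x.isEmpty)  -- [x for x in p.split('\\') if x]
    if 2 ≤ parts.length then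
      String.ofList ('\\' :: '\\' :: parts.getD 0 [] ++ '\\' :: parts.getD 1 [])  -- f"\\\\{parts[0]}\\{parts[1]}"
    else ""

-- ===== PORT B =====
def bSep (c : Char) : Bool := c == '\\' || c == '/'

-- first while loop of _scan: advance past leading separators
def bDropSeps : List Char → List Char
  | [] => []
  | c :: t => if bSep c then bDropSeps t else c :: t

-- second while loop of _scan: the component s[k:m] and the remainder s[m:]
def bSpanComp : List Char → List Char × List Char
  | [] => ([], [])
  | c :: t => if bSep c then ([], c :: t) else
      let (w, r) := bSpanComp t
      (c :: w, r)

-- _scan(s): (component, remainder)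
def bScan (s : List Char) : List Char × List Char := bSpanComp (bDropSeps s)

def unc_share_root_py_alt (path : String) : String :=
  let cs := path.toList
  if !(cs.take 2 = ['\\', '\\'] || cs.take 2 = ['/', '/']) then ""   -- path[:2] not in ('\\\\', '//')
  else
    let (first, rest) := bScan cs
    let (second, _) := bScan rest
    if second ≠ [] then
      String.ofList ('\\' :: '\\' :: first ++ '\\' :: second)
    else ""

-- ===== PRECONDITION & SPEC =====
def Spec_unc_share_root_py (path : String) (out : String) : Prop := out = unc_share_root_py_alt path
instance (path : String) (out : String) : Decidable (Spec_unc_share_root_py path out) := by unfold Spec_unc_share_root_py; infer_instance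

-- ===== CLAIM (what is proved, stated in full; the proofs are below) =====
def Claim_equal_unc_share_root_py : Prop := ∀ (path : String), Dom_unc_share_root_py path → Spec_unc_share_root_py path (unc_share_root_py path)

-- ===== LEMMAS AND PROOFS =====

-- character substitution performed by A's replace
def subSl (c : Char) : Char := if c = '/' then '\\' else c

lemma replace_go_eq (fuel : Nat) : ∀ (l acc : List Char), l.length ≤ fuel →
    PySem.Chars.replace.go ['/'] ['\\'] fuel l acc = acc.reverse ++ l.map subSl := by
  induction fuel with
  | zero =>
    intro l acc h
    have : l = [] := List.eq_nil_of_length_eq_zero (Nat.le_zero.mp h)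
    subst this; simp [PySem.Chars.replace.go]
  | succ f ih =>
    intro l acc h
    cases l with
    | nil => simp [PySem.Chars.replace.go]
    | cons c t =>
      rw [PySem.Chars.replace.go]
      by_cases hc : c = '/'
      · subst hc
        rw [if_pos (by simp [List.isPrefixOf])]
        simp only [List.length_cons, List.length_nil, Nat.zero_add, List.drop_succ_cons,
          List.drop_zero]
        rw [ih t _ (by simpa using h)]
        simp [subSl]
      · rw [if_neg (by simp [List.isPrefixOf]; intro h'; exact hc h'.symm)]
        rw [ih t _ (by simpa using h)]
        simp [subSl, hc]

lemma replace_eq (cs : List Char) :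
    PySem.Chars.replace cs ['/'] ['\\'] = cs.map subSl := by
  rw [PySem.Chars.replace, if_neg (by decide)]
  exact replace_go_eq cs.length cs [] (le_refl _)

-- split on a single character, building the current chunk forward
def splitF (s : Char) : List Char → List Char → List (List Char)
  | [], cur => [cur]
  | c :: t, cur => if c = s then cur :: splitF s t [] else splitF s t (cur ++ [c])

lemma splitOn_go_eq (s : Char) (fuel : Nat) : ∀ (l cur : List Char) (acc : List (List Char)),
    l.length ≤ fuel →
    PySem.Chars.splitOn.go [s] fuel l cur acc = acc.reverse ++ splitF s l cur.reverse := by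
  induction fuel with
  | zero =>
    intro l cur acc h
    have : l = [] := List.eq_nil_of_length_eq_zero (Nat.le_zero.mp h)
    subst this; simp [PySem.Chars.splitOn.go, splitF]
  | succ f ih =>
    intro l cur acc h
    cases l with
    | nil => simp [PySem.Chars.splitOn.go, splitF]
    | cons c t =>
      rw [PySem.Chars.splitOn.go]
      by_cases hc : c = s
      · subst hc
        rw [if_pos (by simp [List.isPrefixOf])]
        simp only [List.length_cons, List.length_nil, Nat.zero_add, List.drop_succ_cons,
          List.drop_zero]
        rw [ih t [] _ (by simpa using h)]
        simp [splitF]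
      · rw [if_neg (by simp [List.isPrefixOf]; intro h'; exact hc h'.symm)]
        rw [ih t (c :: cur) acc (by simpa using h)]
        simp [splitF, hc]

lemma splitOn_eq (s : Char) (cs : List Char) :
    PySem.Chars.splitOn cs [s] = splitF s cs [] := by
  rw [PySem.Chars.splitOn]
  simpa using splitOn_go_eq s (cs.length + 1) cs [] [] (by omega)

-- A's substituted split equals a split that tests bSep on the original characters
def splitB : List Char → List Char → List (List Char)
  | [], cur => [cur]
  | c :: t, cur => if bSep c then cur :: splitB t [] else splitB t (cur ++ [c])

lemma splitF_map_sub (cs : List Char) : ∀ cur,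
    splitF '\\' (cs.map subSl) cur = splitB cs cur := by
  induction cs with
  | nil => intro cur; simp [splitF, splitB]
  | cons c t ih =>
    intro cur
    by_cases hs : bSep c = true
    · have hc : subSl c = '\\' := by
        rcases (by simpa [bSep] using hs : c = '\\' ∨ c = '/') with h | h <;> simp [subSl, h]
      simp [splitF, splitB, hc, hs, ih]
    · have hb : bSep c = false := by simpa using hs
      have h12 : ¬ c = '\\' ∧ ¬ c = '/' := by simpa [bSep] using hb
      have hc : subSl c = c := by simp [subSl, h12.2]
      simp only [List.map_cons, splitF, splitB, hc, hb, h12.1, Bool.false_eq_true, if_false]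
      exact ih _

-- splitting with a pending non-empty chunk: it is emitted extended by the current span
lemma filter_splitB_pending (t : List Char) : ∀ cur, cur ≠ [] →
    (splitB t cur).filter (fun x => !x.isEmpty) =
      (cur ++ (bSpanComp t).1) ::
        ((splitB (bSpanComp t).2 []).filter (fun x => !x.isEmpty)) := by
  induction t with
  | nil =>
    intro cur hcur
    simp [splitB, bSpanComp, hcur]
  | cons c t ih =>
    intro cur hcur
    by_cases hs : bSep c = true
    · simp [splitB, bSpanComp, hs, hcur]
    · have hb : bSep c = false := by simpa using hs
      simp only [splitB, bSpanComp, hb, Bool.false_eq_true, if_false]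
      rw [ih (cur ++ [c]) (by simp)]
      simp

-- B's scan computes exactly the first non-empty chunk of A's filtered split
lemma filter_splitB_scan (cs : List Char) :
    (splitB cs []).filter (fun x => !x.isEmpty) =
      (if (bScan cs).1 = [] then [] else
        (bScan cs).1 :: ((splitB (bScan cs).2 []).filter (fun x => !x.isEmpty))) := by
  induction cs with
  | nil => simp [splitB, bScan, bDropSeps, bSpanComp]
  | cons c t ih =>
    by_cases hs : bSep c = true
    · simp only [splitB, hs, if_true, List.filter_cons, List.isEmpty_nil, Bool.not_true,
        Bool.false_eq_true, if_false]
      rw [ih]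
      simp [bScan, bDropSeps, hs]
    · have hb : bSep c = false := by simpa using hs
      have hscan : bScan (c :: t) = (c :: (bSpanComp t).1, (bSpanComp t).2) := by
        simp [bScan, bDropSeps, bSpanComp, hb]
      simp only [splitB, hb, Bool.false_eq_true, if_false, hscan, List.nil_append]
      rw [filter_splitB_pending t [c] (by simp)]
      simp

-- if the first scanned component is empty, the string held nothing but separators
lemma scan_first_empty (cs : List Char) (h : (bScan cs).1 = []) : (bScan cs).2 = [] := by
  induction cs with
  | nil => simp [bScan, bDropSeps, bSpanComp]
  | cons c t ih =>
    by_cases hs : bSep c = true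
    · have : bScan (c :: t) = bScan t := by simp [bScan, bDropSeps, hs]
      rw [this] at h ⊢; exact ih h
    · have hb : bSep c = false := by simpa using hs
      simp [bScan, bDropSeps, bSpanComp, hb] at h

-- the two UNC-prefix guards agree
lemma guard_eq (path : String) :
    aIsUnc path = (path.toList.take 2 = ['\\', '\\'] || path.toList.take 2 = ['/', '/']) := by
  rw [aIsUnc]
  have h1 : PySem.Str.startswith path "\\\\" = PySem.Chars.startswith path.toList ['\\', '\\'] := by
    simp
  have h2 : PySem.Str.startswith path "//" = PySem.Chars.startswith path.toList ['/', '/'] := by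
    simp
  rw [h1, h2]
  cases hl : path.toList with
  | nil => simp [PySem.Chars.startswith, List.isPrefixOf]
  | cons a t =>
    cases t with
    | nil => simp [PySem.Chars.startswith, List.isPrefixOf]
    | cons b u =>
      simp only [PySem.Chars.startswith, List.isPrefixOf, List.take, Bool.and_true,
        List.cons.injEq, and_true]
      refine Bool.eq_iff_iff.mpr ?_
      simp only [Bool.or_eq_true, Bool.and_eq_true, beq_iff_eq, decide_eq_true_eq]
      constructor
      · rintro (⟨g1, g2⟩ | ⟨g1, g2⟩)
        · exact Or.inl ⟨g1.symm, g2.symm⟩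
        · exact Or.inr ⟨g1.symm, g2.symm⟩
      · rintro (⟨g1, g2⟩ | ⟨g1, g2⟩)
        · exact Or.inl ⟨g1.symm, g2.symm⟩
        · exact Or.inr ⟨g1.symm, g2.symm⟩

-- ===== VERDICT (by name: the statement is the Claim_ definition above) =====
theorem unc_share_root_py_spec : Claim_equal_unc_share_root_py := by
  intro path _
  unfold Spec_unc_share_root_py unc_share_root_py unc_share_root_py_alt
  rw [guard_eq]
  by_cases hg : (path.toList.take 2 = ['\\', '\\'] || path.toList.take 2 = ['/', '/']) = true
  · simp only [hg, Bool.not_true, Bool.false_eq_true, if_false]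
    rw [replace_eq, splitOn_eq, splitF_map_sub]
    set cs := path.toList with hcs
    have h1 := filter_splitB_scan cs
    by_cases hc1 : (bScan cs).1 = []
    · -- no component at all: A's parts are empty, B's second component is empty
      have h2 := scan_first_empty cs hc1
      rw [h1, if_pos hc1]
      have h2' : (bSpanComp (bDropSeps cs)).2 = [] := h2
      simp [bScan, h2', bDropSeps, bSpanComp]
    · rw [h1, if_neg hc1]
      have h3 := filter_splitB_scan (bScan cs).2
      by_cases hc2 : (bScan (bScan cs).2).1 = []
      · rw [h3, if_pos hc2]
        simp [hc2]
      · rw [h3, if_neg hc2]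
        simp [hc2]
  · simp only [hg, Bool.not_false, if_true]
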